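-- pv_equiv track=rewrite | github.com/gozzarda/repolib | repolib/parsedeb.py | debsplit
-- ===== SOURCE A (Python) =====
-- def debsplit(line:str) -> list:
--     """ Improved string.split() with support for things like [] options.
--
--     Adapted from python-apt
--
--     Arguments:
--         line(str): The line to split up.
--     """
--     line = line.strip()
--     pieces:list = []
--     tmp:str = ""
--     # we are inside a [..] block
--     p_found = False
--     for char in line:
--         if char == '[':
--             p_found = True
--             tmp += char
--         elif char == ']':
--             p_found = False
--             tmp += char
--         elif char.isspace() and not p_found:
--             pieces.append(tmp)
--             tmp = ''
--             continue
--         else: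
--             tmp += char
--     # append last piece
--     if len(tmp) > 0:
--         pieces.append(tmp)
--     return pieces
-- ===== SOURCE B (Python) =====
-- def debsplit(line: str) -> list:
--     """Split line on whitespace outside [..] blocks: two passes —
--     collect separator indices, then slice the line between them."""
--     line = line.strip()
--     if not line:
--         return []
--     seps = []
--     inside = False
--     for i, ch in enumerate(line):
--         if ch == '[':
--             inside = True
--         elif ch == ']':
--             inside = False
--         elif not inside and ch.isspace():
--             seps.append(i)
--     starts = [0] + [i + 1 for i in seps]
--     ends = seps + [len(line)]
--     return [line[a:b] for a, b in zip(starts, ends)]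
-- ===== Notes on version B (the rewrite author's own statement) =====
-- stated objective: alternative
-- what changed: B replaces A's single-pass buffer-accumulating scan with two passes: a fold that collects the indices of outside-bracket whitespace separators, then a slicing pass that cuts the stripped line between consecutive separator positions.
import Mathlib
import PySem

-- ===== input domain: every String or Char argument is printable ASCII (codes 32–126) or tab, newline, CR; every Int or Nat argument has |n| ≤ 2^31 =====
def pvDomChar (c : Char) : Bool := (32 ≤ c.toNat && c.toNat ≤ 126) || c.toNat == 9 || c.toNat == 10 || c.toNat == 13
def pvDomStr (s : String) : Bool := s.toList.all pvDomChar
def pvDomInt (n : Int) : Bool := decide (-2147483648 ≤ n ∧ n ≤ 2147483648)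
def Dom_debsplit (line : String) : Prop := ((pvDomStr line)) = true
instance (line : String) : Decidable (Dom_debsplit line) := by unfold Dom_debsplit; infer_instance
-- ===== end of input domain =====

-- B replaces A's buffer-accumulating scan by two passes (collect separator indices, then slice between them); alternative decomposition, not faster.

-- ===== PORT A =====
-- A's loop state: (pieces, tmp, p_found); chars are handled as List Char, pieces turned into Strings at the end.
def pvStepA (st : List (List Char) × List Char × Bool) (c : Char) : List (List Char) × List Char × Bool :=
  if c = '[' then (st.1, st.2.1 ++ [c], true)
  else if c = ']' then (st.1, st.2.1 ++ [c], false)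
  else if PySem.Chars.isspace c && !st.2.2 then (st.1 ++ [st.2.1], [], st.2.2)
  else (st.1, st.2.1 ++ [c], st.2.2)

def debsplit (line : String) : List String :=
  let cs := (PySem.Str.strip line).toList
  let st := cs.foldl pvStepA ([], [], false)
  let pieces := if st.2.1.length > 0 then st.1 ++ [st.2.1] else st.1
  pieces.map String.ofList

-- ===== PORT B =====
-- B's first pass: fold over enumerate collecting the indices of separators (state: (inside, seps)).
def pvStepB (st : Bool × List Int) (ic : Int × Char) : Bool × List Int :=
  if ic.2 = '[' then (true, st.2)
  else if ic.2 = ']' then (false, st.2)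
  else if !st.1 && PySem.Chars.isspace ic.2 then (st.1, st.2 ++ [ic.1])
  else st

def debsplit_alt (line : String) : List String :=
  let s := PySem.Str.strip line
  if s = "" then []
  else
    let seps := ((PySem.List.enumerate s.toList 0).foldl pvStepB (false, [])).2
    let starts := (0 : Int) :: seps.map (· + 1)
    let ends := seps ++ [PySem.Str.len s]
    (starts.zip ends).map (fun ab => PySem.Str.slice s (some ab.1) (some ab.2))

-- ===== PRECONDITION & SPEC =====
def Spec_debsplit (line : String) (out : List String) : Prop := out = debsplit_alt line
instance (line : String) (out : List String) : Decidable (Spec_debsplit line out) := by unfold Spec_debsplit; infer_instance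

-- ===== CLAIM (what is proved, stated in full; the proofs are below) =====
def Claim_equal_debsplit : Prop := ∀ (line : String), Dom_debsplit line → Spec_debsplit line (debsplit line)

-- ===== LEMMAS AND PROOFS =====

-- common specification: split a char list at outside-bracket whitespace (pieces, possibly empty, in order)
def pvConsHead (c : Char) : List (List Char) → List (List Char)
  | [] => [[c]]
  | h :: t => (c :: h) :: t

def pvSplitGo : List Char → Bool → List (List Char)
  | [], _ => [[]]
  | c :: cs, p =>
    if c = '[' then pvConsHead c (pvSplitGo cs true)
    else if c = ']' then pvConsHead c (pvSplitGo cs false)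
    else if PySem.Chars.isspace c && !p then [] :: pvSplitGo cs p
    else pvConsHead c (pvSplitGo cs p)

theorem pvSplitGo_cons (c : Char) (cs : List Char) (p : Bool) :
    pvSplitGo (c :: cs) p =
      if c = '[' then pvConsHead c (pvSplitGo cs true)
      else if c = ']' then pvConsHead c (pvSplitGo cs false)
      else if PySem.Chars.isspace c && !p then [] :: pvSplitGo cs p
      else pvConsHead c (pvSplitGo cs p) := rfl

-- drop the last piece iff it is empty
def pvDle : List (List Char) → List (List Char)
  | [] => []
  | [x] => if x.length > 0 then [x] else []
  | x :: y :: t => x :: pvDle (y :: t)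

def pvAttach (tmp : List Char) : List (List Char) → List (List Char)
  | [] => [tmp]
  | h :: t => (tmp ++ h) :: t

def pvFinA (st : List (List Char) × List Char × Bool) : List (List Char) :=
  if st.2.1.length > 0 then st.1 ++ [st.2.1] else st.1

theorem pvConsHead_ne_nil (c : Char) (l : List (List Char)) : pvConsHead c l ≠ [] := by
  cases l <;> simp [pvConsHead]

theorem pvSplitGo_ne_nil (cs : List Char) (p : Bool) : pvSplitGo cs p ≠ [] := by
  cases cs with
  | nil => simp [pvSplitGo]
  | cons c cs =>
    simp only [pvSplitGo]
    split_ifs <;> first | exact pvConsHead_ne_nil _ _ | simp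

theorem pvDle_cons (x : List Char) (l : List (List Char)) (h : l ≠ []) :
    pvDle (x :: l) = x :: pvDle l := by
  cases l with
  | nil => exact absurd rfl h
  | cons y t => rfl

theorem pvAttach_consHead (tmp : List Char) (c : Char) (l : List (List Char)) :
    pvAttach tmp (pvConsHead c l) = pvAttach (tmp ++ [c]) l := by
  cases l <;> simp [pvAttach, pvConsHead]

theorem pvAttach_nil (l : List (List Char)) (h : l ≠ []) : pvAttach [] l = l := by
  cases l with
  | nil => exact absurd rfl h
  | cons x t => simp [pvAttach]

theorem pvA_fold (cs : List Char) : ∀ (pieces : List (List Char)) (tmp : List Char) (p : Bool),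
    pvFinA (cs.foldl pvStepA (pieces, tmp, p)) = pieces ++ pvDle (pvAttach tmp (pvSplitGo cs p)) := by
  induction cs with
  | nil =>
    intro pieces tmp p
    by_cases h : tmp.length > 0 <;>
      simp [pvFinA, pvSplitGo, pvAttach, pvDle, h]
  | cons c cs ih =>
    intro pieces tmp p
    simp only [List.foldl_cons, pvStepA, pvSplitGo]
    split_ifs with h1 h2 h3
    · rw [ih, pvAttach_consHead]
    · rw [ih, pvAttach_consHead]
    · rw [ih, pvAttach_nil _ (pvSplitGo_ne_nil cs p),
        show pvAttach tmp ([] :: pvSplitGo cs p) = tmp :: pvSplitGo cs p by simp [pvAttach],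
        pvDle_cons _ _ (pvSplitGo_ne_nil cs p)]
      simp
    · rw [ih, pvAttach_consHead]

-- A's result characterised
theorem pvA_char (line : String) :
    debsplit line = (pvDle (pvSplitGo (PySem.Chars.strip line.toList) false)).map String.ofList := by
  show (pvFinA ((PySem.Str.strip line).toList.foldl pvStepA ([], [], false))).map String.ofList = _
  rw [pvA_fold, PySem.Str.toList_strip, pvAttach_nil _ (pvSplitGo_ne_nil _ _)]
  simp

-- B-side: recursive description of the separator indices and of the slicing pass
def pvFlagF : List Char → Bool → Bool
  | [], p => p
  | c :: cs, p =>
    if c = '[' then pvFlagF cs true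
    else if c = ']' then pvFlagF cs false
    else pvFlagF cs p

def pvSepsN : List Char → Bool → List Nat
  | [], _ => []
  | c :: cs, p =>
    if c = '[' then (pvSepsN cs true).map (· + 1)
    else if c = ']' then (pvSepsN cs false).map (· + 1)
    else if !p && PySem.Chars.isspace c then 0 :: (pvSepsN cs p).map (· + 1)
    else (pvSepsN cs p).map (· + 1)

def pvPieces (cs : List Char) (S : List Nat) : List (List Char) :=
  ((0 :: S.map (· + 1)).zip (S ++ [cs.length])).map (fun ab => (cs.drop ab.1).take (ab.2 - ab.1))

theorem pvMapShift (k : Int) (S : List Nat) :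
    (S.map (· + 1)).map (fun j : Nat => k + (j : Int)) = S.map (fun j : Nat => (k + 1) + (j : Int)) := by
  rw [List.map_map]
  apply List.map_congr_left
  intro j _
  simp only [Function.comp_apply]
  push_cast
  ring

theorem pvB_fold (cs : List Char) : ∀ (k : Int) (p : Bool) (acc : List Int),
    (PySem.List.enumerate cs k).foldl pvStepB (p, acc)
      = (pvFlagF cs p, acc ++ (pvSepsN cs p).map (fun (j : Nat) => k + (j : Int))) := by
  induction cs with
  | nil =>
    intro k p acc
    simp [PySem.List.enumerate, pvFlagF, pvSepsN]
  | cons c cs ih =>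
    intro k p acc
    rw [PySem.List.enumerate_cons]
    simp only [List.foldl_cons, pvStepB, pvFlagF, pvSepsN]
    split_ifs with h1 h2 h3
    · rw [ih, pvMapShift]
    · rw [ih, pvMapShift]
    · rw [ih]
      simp only [List.map_cons, pvMapShift, Nat.cast_zero, add_zero, List.append_assoc,
        List.cons_append, List.nil_append]
    · rw [ih, pvMapShift]

theorem pvZip_shift (c : Char) (cs : List Char) (xs ys : List Nat) :
    ((xs.map (· + 1)).zip (ys.map (· + 1))).map (fun ab => ((c :: cs).drop ab.1).take (ab.2 - ab.1))
      = (xs.zip ys).map (fun ab => (cs.drop ab.1).take (ab.2 - ab.1)) := by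
  induction xs generalizing ys with
  | nil => simp
  | cons x xs ih =>
    cases ys with
    | nil => simp
    | cons y ys => simp [ih]

theorem pvPieces_shift (c : Char) (cs : List Char) (S : List Nat) :
    pvPieces (c :: cs) (S.map (· + 1)) = pvConsHead c (pvPieces cs S) := by
  obtain ⟨e, E, hE⟩ : ∃ e E, S ++ [cs.length] = e :: E := by
    cases S <;> exact ⟨_, _, rfl⟩
  have hEnds : (S.map (· + 1)) ++ [(c :: cs).length] = (e + 1) :: E.map (· + 1) := by
    rw [List.length_cons,
      show S.map (· + 1) ++ [cs.length + 1] = (S ++ [cs.length]).map (· + 1) by simp, hE]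
    rfl
  simp only [pvPieces, hEnds, hE, List.zip_cons_cons, List.map_cons]
  rw [pvZip_shift]
  simp [pvConsHead]

theorem pvPieces_sep (c : Char) (cs : List Char) (S : List Nat) :
    pvPieces (c :: cs) (0 :: S.map (· + 1)) = [] :: pvPieces cs S := by
  unfold pvPieces
  rw [show (0 :: S.map (· + 1)) ++ [(c :: cs).length] = 0 :: (S ++ [cs.length]).map (· + 1) by simp,
    List.zip_cons_cons, List.map_cons, pvZip_shift]
  simp

theorem pvB_main (cs : List Char) : ∀ (p : Bool), pvPieces cs (pvSepsN cs p) = pvSplitGo cs p := by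
  induction cs with
  | nil =>
    intro p
    simp [pvPieces, pvSepsN, pvSplitGo]
  | cons c cs ih =>
    intro p
    simp only [pvSepsN, pvSplitGo]
    by_cases h1 : c = '['
    · rw [if_pos h1, if_pos h1, pvPieces_shift, ih]
    · rw [if_neg h1, if_neg h1]
      by_cases h2 : c = ']'
      · rw [if_pos h2, if_pos h2, pvPieces_shift, ih]
      · rw [if_neg h2, if_neg h2]
        by_cases h3 : (!p && PySem.Chars.isspace c) = true
        · have h3' : (PySem.Chars.isspace c && !p) = true := by rw [Bool.and_comm]; exact h3
          rw [if_pos h3, if_pos h3', pvPieces_sep, ih]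
        · have h3' : ¬(PySem.Chars.isspace c && !p) = true := by rw [Bool.and_comm]; exact h3
          rw [if_neg h3, if_neg h3', pvPieces_shift, ih]

theorem pvIntNat (t : List Char) (S : List Nat) :
    (((0 : Int) :: (S.map (fun j : Nat => (j : Int))).map (· + 1)).zip
        ((S.map (fun j : Nat => (j : Int))) ++ [(t.length : Int)])).map
      (fun ab => PySem.List.slice t (some ab.1) (some ab.2)) = pvPieces t S := by
  have h1 : (0 : Int) :: (S.map (fun j : Nat => (j : Int))).map (· + 1)
      = (0 :: S.map (· + 1)).map (fun j : Nat => (j : Int)) := by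
    simp only [List.map_cons, Nat.cast_zero, List.map_map]
    congr 1
  have h2 : (S.map (fun j : Nat => (j : Int))) ++ [(t.length : Int)]
      = (S ++ [t.length]).map (fun j : Nat => (j : Int)) := by
    simp
  rw [h1, h2, List.zip_map, List.map_map]
  unfold pvPieces
  apply List.map_congr_left
  intro ab _
  obtain ⟨a, b⟩ := ab
  simp only [Function.comp_apply, Prod.map_apply]
  exact PySem.List.slice_natCast t a b

theorem pvB_char (line : String) (h : PySem.Chars.strip line.toList ≠ []) :
    debsplit_alt line = (pvSplitGo (PySem.Chars.strip line.toList) false).map String.ofList := by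
  have hs : PySem.Str.strip line ≠ "" := by
    intro h0
    apply h
    rw [← PySem.Str.toList_strip, h0]
    rfl
  simp only [debsplit_alt, if_neg hs]
  rw [pvB_fold]
  simp only [List.nil_append, zero_add, PySem.Str.len]
  rw [show PySem.Chars.strip line.toList = (PySem.Str.strip line).toList from
    (PySem.Str.toList_strip line).symm]
  rw [← pvB_main (PySem.Str.strip line).toList false,
    ← pvIntNat (PySem.Str.strip line).toList (pvSepsN (PySem.Str.strip line).toList false)]
  simp only [List.map_map]
  apply List.map_congr_left
  intro ab _
  simp only [Function.comp_apply]
  rw [← String.ofList_toList (s := PySem.Str.slice _ _ _), PySem.Str.toList_slice,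
    PySem.Chars.slice_eq_listSlice]

theorem pvHead_dropWhile {p : Char → Bool} : ∀ (l : List Char) (c : Char),
    (l.dropWhile p).head? = some c → p c = false := by
  intro l
  induction l with
  | nil => intro c h; simp at h
  | cons x xs ih =>
    intro c h
    by_cases hx : p x
    · rw [List.dropWhile_cons_of_pos hx] at h
      exact ih c h
    · rw [List.dropWhile_cons_of_neg hx] at h
      simp at h
      subst h
      simpa using hx

theorem pvConsHead_getLast_ne (c : Char) (l : List (List Char)) (h : l.getLast? ≠ some []) :
    (pvConsHead c l).getLast? ≠ some [] := by
  cases l with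
  | nil => simp [pvConsHead]
  | cons x t =>
    cases t with
    | nil => simp [pvConsHead]
    | cons y u => simpa [pvConsHead, List.getLast?_cons_cons] using h

-- the stripped line has no trailing whitespace
theorem pvStrip_last (s : List Char) (c : Char) (h : (PySem.Chars.strip s).getLast? = some c) :
    PySem.Chars.isspace c = false := by
  have h' : ((PySem.Chars.lstrip s).reverse.dropWhile PySem.Chars.isspace).head? = some c := by
    simpa [PySem.Chars.strip, PySem.Chars.rstrip, List.getLast?_reverse] using h
  exact pvHead_dropWhile _ _ h'

-- hence the last piece of pvSplitGo is nonempty, and pvDle is a no-op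
theorem pvGo_last (cs : List Char) : ∀ (p : Bool), cs ≠ [] →
    (∀ c, cs.getLast? = some c → PySem.Chars.isspace c = false) →
    (pvSplitGo cs p).getLast? ≠ some [] := by
  induction cs with
  | nil => intro p h; exact absurd rfl h
  | cons c cs ih =>
    intro p _ hlast
    cases cs with
    | nil =>
      have hc : PySem.Chars.isspace c = false := hlast c (by simp)
      rw [pvSplitGo_cons]
      split_ifs with h1 h2 h3
      · simp [pvSplitGo, pvConsHead]
      · simp [pvSplitGo, pvConsHead]
      · rw [hc] at h3; simp at h3
      · simp [pvSplitGo, pvConsHead]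
    | cons d ds =>
      have hne : (d :: ds) ≠ [] := by simp
      have hl : ∀ x, (d :: ds).getLast? = some x → PySem.Chars.isspace x = false := by
        intro x hx
        apply hlast
        rw [List.getLast?_cons_cons]
        exact hx
      have hrec := fun p' => ih p' hne hl
      rw [pvSplitGo_cons]
      split_ifs with h1 h2 h3
      · exact pvConsHead_getLast_ne c _ (hrec true)
      · exact pvConsHead_getLast_ne c _ (hrec false)
      · obtain ⟨y, t, hyt⟩ := List.exists_cons_of_ne_nil (pvSplitGo_ne_nil (d :: ds) p)
        rw [hyt, List.getLast?_cons_cons]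
        have := hrec p
        rw [hyt] at this
        exact this
      · exact pvConsHead_getLast_ne c _ (hrec p)

theorem pvDle_noop (l : List (List Char)) (h : l.getLast? ≠ some []) : pvDle l = l := by
  induction l with
  | nil => rfl
  | cons x t ih =>
    cases t with
    | nil =>
      have hx : x ≠ [] := by
        intro hx
        apply h
        simp [hx]
      simp only [pvDle]
      rw [if_pos (by simpa [List.length_pos_iff] using hx)]
    | cons y u =>
      rw [pvDle_cons _ _ (by simp), ih (by rwa [List.getLast?_cons_cons] at h)]

-- ===== VERDICT (by name: the statement is the Claim_ definition above) =====
theorem debsplit_spec : Claim_equal_debsplit := by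
  intro line _
  unfold Spec_debsplit
  rw [pvA_char]
  by_cases h : PySem.Chars.strip line.toList = []
  · have hs : PySem.Str.strip line = "" := by
      have ht := PySem.Str.toList_strip line
      rw [h] at ht
      rw [← String.ofList_toList (s := PySem.Str.strip line), ht]
    rw [h]
    simp [debsplit_alt, hs, pvSplitGo, pvDle]
  · rw [pvB_char line h]
    congr 1
    apply pvDle_noop
    apply pvGo_last _ false h
    intro c hc
    exact pvStrip_last line.toList c hc
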